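-- pv_equiv track=rewrite | github.com/olsenw/LeetCodeExercises | Python3/divide_array_into_equal_pairs.py | divideArray_set
-- ===== SOURCE A (Python) =====
-- from typing import Counter, List, Dict, Set, Optional
--
-- def divideArray_set(nums: List[int]) -> bool:
--     s = set()
--     for n in nums:
--         if n in s:
--             s.remove(n)
--         else:
--             s.add(n)
--     return len(s) == 0
-- ===== SOURCE B (Python) =====
-- def divideArray_set(nums):
--     counts = {}
--     for n in nums:
--         counts[n] = counts.get(n, 0) + 1
--     return all(v % 2 == 0 for v in counts.values())
-- ===== Notes on version B (the rewrite author's own statement) =====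
-- stated objective: alternative
-- what changed: Replaces A's single-pass parity-toggle on a set (add/remove branch per element) with a build-frequency-dict pass followed by a separate all-values-even scan.
import Mathlib
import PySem

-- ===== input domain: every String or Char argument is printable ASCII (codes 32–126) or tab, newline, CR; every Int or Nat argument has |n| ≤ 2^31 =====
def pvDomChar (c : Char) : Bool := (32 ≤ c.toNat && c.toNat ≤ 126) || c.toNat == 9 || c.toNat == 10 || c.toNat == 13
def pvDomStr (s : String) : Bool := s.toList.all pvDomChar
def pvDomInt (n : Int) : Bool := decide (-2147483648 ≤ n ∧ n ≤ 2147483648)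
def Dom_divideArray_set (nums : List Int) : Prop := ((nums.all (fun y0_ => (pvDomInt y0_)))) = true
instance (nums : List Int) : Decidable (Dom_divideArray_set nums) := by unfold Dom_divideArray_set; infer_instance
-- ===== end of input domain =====

-- B replaces A's single-pass parity toggle on a set with a frequency dict built first, then an all-values-even scan (alternative decomposition, same cost).

-- ===== PORT A =====
-- the loop body: 'if n in s: s.remove(n) else: s.add(n)'
-- (s.remove on an element known to be in s is exactly Set.discard)
def pvToggle (s : PySem.Set Int) (n : Int) : PySem.Set Int :=
  if PySem.Set.contains s n then PySem.Set.discard s n else PySem.Set.add s n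

def divideArray_set (nums : List Int) : Bool :=
  let s := nums.foldl pvToggle PySem.Set.empty
  PySem.Set.len s == 0

-- ===== PORT B =====
def divideArray_set_alt (nums : List Int) : Bool :=
  let counts := nums.foldl (fun d n => d.insert n (d.getD n 0 + 1)) (PySem.Dict.empty : PySem.Dict Int Int)
  (PySem.Dict.values counts).all (fun v => PySem.Int.mod v 2 == 0)

-- ===== PRECONDITION & SPEC =====
def Spec_divideArray_set (nums : List Int) (out : Bool) : Prop := out = divideArray_set_alt nums
instance (nums : List Int) (out : Bool) : Decidable (Spec_divideArray_set nums out) := by unfold Spec_divideArray_set; infer_instance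

-- ===== CLAIM (what is proved, stated in full; the proofs are below) =====
def Claim_equal_divideArray_set : Prop := ∀ (nums : List Int), Dom_divideArray_set nums → Spec_divideArray_set nums (divideArray_set nums)

-- ===== LEMMAS AND PROOFS =====

-- membership in the toggle fold tracks the parity of the count
lemma mem_toggle_fold (xs : List Int) : ∀ (s : PySem.Set Int) (x : Int),
    (x ∈ xs.foldl pvToggle s ↔ ((x ∈ s) ↔ xs.count x % 2 = 0)) := by
  induction xs with
  | nil => intro s x; simp
  | cons n xs ih =>
    intro s x
    rw [List.foldl_cons, ih (pvToggle s n) x]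
    have hstep : x ∈ pvToggle s n ↔ ((x ∈ s) ↔ ¬ x = n) := by
      by_cases hxn : x = n
      · subst hxn
        by_cases hns : x ∈ s <;>
          simp [pvToggle, hns, PySem.Set.mem_discard]
      · by_cases hns : n ∈ s <;>
          simp [pvToggle, hns, PySem.Set.mem_discard, hxn]
    rw [hstep]
    by_cases hxn : x = n
    · subst hxn
      by_cases hs : x ∈ s <;> simp [hs] <;> omega
    · by_cases hs : x ∈ s <;> simp [hs, hxn, Ne.symm hxn]

lemma A_true_iff (nums : List Int) :
    divideArray_set nums = true ↔ ∀ x : Int, nums.count x % 2 = 0 := by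
  unfold divideArray_set
  simp only [PySem.Set.len, beq_iff_eq, Int.natCast_eq_zero, List.length_eq_zero_iff]
  rw [List.eq_nil_iff_forall_not_mem]
  constructor
  · intro h x
    have hnot := (mem_toggle_fold nums PySem.Set.empty x).not.mp (h x)
    simpa [PySem.Set.empty] using hnot
  · intro h x hx
    have hmem := (mem_toggle_fold nums PySem.Set.empty x).mp hx
    simp [PySem.Set.empty, h x] at hmem

lemma B_true_iff (nums : List Int) :
    divideArray_set_alt nums = true ↔ ∀ x : Int, nums.count x % 2 = 0 := by
  unfold divideArray_set_alt
  rw [PySem.Dict.foldl_insert_getD_add_one_eq_counter]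
  simp only [PySem.Dict.values, PySem.Dict.items_counter, List.map_map, List.all_eq_true,
    List.mem_map, Function.comp]
  constructor
  · intro h x
    by_cases hx : x ∈ nums
    · have hv := h _ ⟨x, (PySem.Set.mem_ofList nums x).mpr hx, rfl⟩
      simp only [beq_iff_eq] at hv
      rw [PySem.Int.mod_eq_emod_of_pos (by norm_num)] at hv
      omega
    · simp [List.count_eq_zero_of_not_mem hx]
  · rintro h v ⟨k, _, rfl⟩
    simp only [beq_iff_eq]
    rw [PySem.Int.mod_eq_emod_of_pos (by norm_num)]
    have hk := h k
    omega

-- ===== VERDICT (by name: the statement is the Claim_ definition above) =====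
theorem divideArray_set_spec : Claim_equal_divideArray_set := by
  intro nums _
  unfold Spec_divideArray_set
  rw [Bool.eq_iff_iff, A_true_iff, B_true_iff]
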